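-- pv_equiv track=rewrite | github.com/Alburrito/advent-of-code | 2015/Day01/main.py | get_floor_and_position
-- ===== SOURCE A (Python) =====
-- def get_floor_and_position(data):
--     floor = 0
--     position = -1
--     for index, char in enumerate(data):
--         if char == '(':
--             floor += 1
--         else:
--             floor -= 1
--
--         if position < 0 and floor < 0:
--             position = index
--
--     return floor, position+1
-- ===== SOURCE B (Python) =====
-- def get_floor_and_position(data):
--     # Closed-form final floor: every '(' is +1, every other char is -1.
--     floor = 2 * sum(c == '(' for c in data) - len(data)
--     balance = 0
--     for i, c in enumerate(data):
--         balance += 1 if c == '(' else -1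
--         if balance < 0:
--             return floor, i + 1
--     return floor, 0
-- ===== Notes on version B (the rewrite author's own statement) =====
-- stated objective: alternative
-- what changed: A's single combined pass tracking both floor and first-basement position is replaced by a closed-form floor (twice the count of open parens minus the length) plus a separate early-exit scan for the first index where the running balance goes negative.
import Mathlib
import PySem

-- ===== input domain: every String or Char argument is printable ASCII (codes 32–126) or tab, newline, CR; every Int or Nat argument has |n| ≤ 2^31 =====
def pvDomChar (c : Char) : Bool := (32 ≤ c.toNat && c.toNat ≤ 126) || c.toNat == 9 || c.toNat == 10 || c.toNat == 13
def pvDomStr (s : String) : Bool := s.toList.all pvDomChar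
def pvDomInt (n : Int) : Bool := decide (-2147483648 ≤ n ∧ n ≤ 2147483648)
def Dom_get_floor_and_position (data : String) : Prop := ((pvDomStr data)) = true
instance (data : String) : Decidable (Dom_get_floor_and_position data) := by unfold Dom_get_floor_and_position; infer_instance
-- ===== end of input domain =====

-- B replaces A's single combined pass by a closed-form floor (2*count('(') - len)
-- plus a separate early-exit scan for the first basement position (objective: alternative).

-- ===== PORT A =====
-- one loop step of A: update floor, then record the index if both position and floor are negative
def pvAStep (st : Int × Int) (ic : Int × Char) : Int × Int :=
  let floor := if ic.2 = '(' then st.1 + 1 else st.1 - 1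
  let position := if st.2 < 0 ∧ floor < 0 then ic.1 else st.2
  (floor, position)

def get_floor_and_position (data : String) : Int × Int :=
  let st := (PySem.List.enumerate data.toList 0).foldl pvAStep (0, -1)
  (st.1, st.2 + 1)

-- ===== PORT B =====
-- Source B's early-exit for-loop over enumerate(data): first i+1 where the balance goes negative, else 0
def pvBPos (l : List Char) (i : Int) (bal : Int) : Int :=
  match l with
  | [] => 0
  | c :: rest =>
    let b := bal + (if c = '(' then 1 else -1)
    if b < 0 then i + 1 else pvBPos rest (i + 1) b

def get_floor_and_position_alt (data : String) : Int × Int :=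
  let floor : Int := 2 * (data.toList.count '(' : Int) - (data.toList.length : Int)
  (floor, pvBPos data.toList 0 0)

-- ===== PRECONDITION & SPEC =====
def Spec_get_floor_and_position (data : String) (out : Int × Int) : Prop := out = get_floor_and_position_alt data
instance (data : String) (out : Int × Int) : Decidable (Spec_get_floor_and_position data out) := by unfold Spec_get_floor_and_position; infer_instance

-- ===== CLAIM (what is proved, stated in full; the proofs are below) =====
def Claim_equal_get_floor_and_position : Prop := ∀ (data : String), Dom_get_floor_and_position data → Spec_get_floor_and_position data (get_floor_and_position data)

-- ===== LEMMAS AND PROOFS =====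

-- Once A's position is set (nonnegative), it never changes and the floor just accumulates.
theorem pvA_loop_nonneg (l : List Char) (i f p : Int) (hp : 0 ≤ p) :
    (PySem.List.enumerate l i).foldl pvAStep (f, p) =
      (f + 2 * (l.count '(' : Int) - (l.length : Int), p) := by
  induction l generalizing i f with
  | nil => simp [PySem.List.enumerate_nil]
  | cons c rest ih =>
    rw [PySem.List.enumerate_cons, List.foldl_cons]
    show (PySem.List.enumerate rest (i + 1)).foldl pvAStep (pvAStep (f, p) (i, c)) = _
    by_cases hc : c = '('
    · rw [show pvAStep (f, p) (i, c) = (f + 1, p) by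
        simp [pvAStep, hc]; omega]
      rw [ih (i + 1) (f + 1)]
      simp [hc]
      omega
    · rw [show pvAStep (f, p) (i, c) = (f - 1, p) by
        simp [pvAStep, hc]; omega]
      rw [ih (i + 1) (f - 1)]
      simp [hc]
      omega

-- While A's position is still -1, its loop computes B's two quantities (position shifted by one).
theorem pvA_loop_neg (l : List Char) (i f : Int) (hi : 0 ≤ i) :
    (PySem.List.enumerate l i).foldl pvAStep (f, -1) =
      (f + 2 * (l.count '(' : Int) - (l.length : Int), pvBPos l i f - 1) := by
  induction l generalizing i f with
  | nil => simp [PySem.List.enumerate_nil, pvBPos]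
  | cons c rest ih =>
    rw [PySem.List.enumerate_cons, List.foldl_cons]
    by_cases hc : c = '('
    · -- floor goes up; it was ≥ -1 relation unknown, but new floor f+1 may still be < 0
      by_cases hneg : f + 1 < 0
      · rw [show pvAStep (f, -1) (i, c) = (f + 1, i) by
          simp [pvAStep, hc, hneg]]
        rw [pvA_loop_nonneg rest (i + 1) (f + 1) i hi]
        simp [pvBPos, hc, hneg]
        omega
      · rw [show pvAStep (f, -1) (i, c) = (f + 1, -1) by
          simp [pvAStep, hc, hneg]]
        rw [ih (i + 1) (f + 1) (by omega)]
        simp [pvBPos, hc, hneg]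
        omega
    · by_cases hneg : f - 1 < 0
      · rw [show pvAStep (f, -1) (i, c) = (f - 1, i) by
          simp [pvAStep, hc, hneg]]
        rw [pvA_loop_nonneg rest (i + 1) (f - 1) i hi]
        simp [pvBPos, hc]
        constructor
        · omega
        · rw [if_pos (by omega)]; omega
      · rw [show pvAStep (f, -1) (i, c) = (f - 1, -1) by
          simp [pvAStep, hc, hneg]]
        rw [ih (i + 1) (f - 1) (by omega)]
        simp [pvBPos, hc]
        constructor
        · omega
        · rw [if_neg (by omega)]
          have h : f + -1 = f - 1 := by ring
          rw [h]

-- ===== VERDICT (by name: the statement is the Claim_ definition above) =====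
theorem get_floor_and_position_spec : Claim_equal_get_floor_and_position := by
  intro data _
  unfold Spec_get_floor_and_position get_floor_and_position get_floor_and_position_alt
  rw [pvA_loop_neg data.toList 0 0 le_rfl]
  simp
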